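-- pv_equiv track=rewrite | github.com/assister-xyz/quality-oracle | src/api/v1/evaluate.py | _select_best_tool
-- ===== SOURCE A (Python) =====
-- def _select_best_tool(question: str, tools: list) -> dict:
--     """Select the best tool to answer a question based on keyword overlap.
--
--     Scores each tool by overlap between question words and tool name + description.
--     Returns the tool dict with highest score (falls back to first tool).
--     """
--     if not tools:
--         return {}
--     if len(tools) == 1:
--         return tools[0]
--
--     question_words = set(question.lower().split())
--     best_tool = tools[0]
--     best_score = -1
--
--     for tool in tools:
--         name_words = set(tool.get("name", "").lower().replace("_", " ").replace("-", " ").split())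
--         desc_words = set(tool.get("description", "").lower().split())
--         tool_words = name_words | desc_words
--         overlap = len(question_words & tool_words)
--         if overlap > best_score:
--             best_score = overlap
--             best_tool = tool
--     return best_tool
-- ===== SOURCE B (Python) =====
-- def _select_best_tool(question: str, tools: list) -> dict:
--     """Divide-and-conquer tournament: recursively pick the best of each half
--     (ties go to the left, i.e. earlier, half); overlap is counted as the number
--     of distinct question words occurring in the tool's combined word list."""
--     if not tools:
--         return {}
--     if len(tools) == 1:
--         return tools[0]
--
--     qwords = set(question.lower().split())
--
--     def score(tool):
--         words = tool.get("name", "").lower().replace("_", " ").replace("-", " ").split() \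
--               + tool.get("description", "").lower().split()
--         return sum(1 for w in qwords if w in words)
--
--     def best(lo, hi):
--         if hi - lo == 1:
--             tool = tools[lo]
--             return tool, score(tool)
--         mid = (lo + hi) // 2
--         left, right = best(lo, mid), best(mid, hi)
--         return left if left[1] >= right[1] else right
--
--     return best(0, len(tools))[0]
-- ===== Notes on version B (the rewrite author's own statement) =====
-- stated objective: alternative
-- what changed: B replaces A's linear scan with a running (tool, best_score) maximum by a recursive divide-and-conquer tournament over index halves whose merge prefers the left half on ties, and it counts overlap by summing membership of each distinct question word in the tool's concatenated word list instead of building a set union and intersecting.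
import Mathlib
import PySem

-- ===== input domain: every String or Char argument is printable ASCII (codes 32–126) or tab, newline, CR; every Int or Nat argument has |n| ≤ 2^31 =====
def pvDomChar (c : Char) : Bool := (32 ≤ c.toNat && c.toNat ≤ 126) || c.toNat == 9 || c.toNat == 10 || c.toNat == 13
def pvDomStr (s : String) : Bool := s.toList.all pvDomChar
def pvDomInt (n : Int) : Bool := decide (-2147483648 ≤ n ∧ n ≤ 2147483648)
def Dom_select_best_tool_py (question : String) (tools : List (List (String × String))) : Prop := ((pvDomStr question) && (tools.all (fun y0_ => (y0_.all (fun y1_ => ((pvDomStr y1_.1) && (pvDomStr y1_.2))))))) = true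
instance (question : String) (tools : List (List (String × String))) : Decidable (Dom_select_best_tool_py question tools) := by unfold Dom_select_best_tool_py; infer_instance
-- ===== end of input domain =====

-- B replaces A's linear running-max scan by a recursive divide-and-conquer tournament (ties to the left half) and counts overlap by membership of distinct question words in a concatenated word list instead of set intersection (alternative decomposition, same cost).


-- ===== PORT A =====
def select_best_tool_py (question : String) (tools : List (List (String × String))) : List (String × String) :=
  if tools = [] then []
  else if tools.length = 1 then PySem.List.pyGetD tools 0 []
  else
    let question_words : PySem.Set String :=
      PySem.Set.ofList (PySem.Str.split₀ (PySem.Str.lower question))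
    let best := tools.foldl (fun (st : List (String × String) × Int) tool =>
      let d := PySem.Dict.ofList tool
      let name_words : PySem.Set String := PySem.Set.ofList (PySem.Str.split₀
        (PySem.Str.replace (PySem.Str.replace (PySem.Str.lower (d.getD "name" "")) "_" " ") "-" " "))
      let desc_words : PySem.Set String := PySem.Set.ofList (PySem.Str.split₀
        (PySem.Str.lower (d.getD "description" "")))
      let tool_words := PySem.Set.union name_words desc_words
      let overlap : Int := PySem.Set.len (PySem.Set.inter question_words tool_words)
      if overlap > st.2 then (tool, overlap) else st)
      (PySem.List.pyGetD tools 0 [], -1)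
    best.1

-- ===== PORT B =====
-- helper of B (python closure 'score'): distinct question words counted by membership in the concatenated word list
def bScore (qwords : PySem.Set String) (tool : List (String × String)) : Int :=
  let d := PySem.Dict.ofList tool
  let words : List String :=
    PySem.Str.split₀ (PySem.Str.replace (PySem.Str.replace (PySem.Str.lower (d.getD "name" "")) "_" " ") "-" " ")
    ++ PySem.Str.split₀ (PySem.Str.lower (d.getD "description" ""))
  ((List.countP (fun w => words.contains w) qwords : Nat) : Int)

-- helper of B (python closure 'best'): tournament over tools[lo:hi]; 'fuel' is only a
-- structural totality device (any fuel ≥ hi - lo gives Python's recursion; best is only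
-- ever called with lo < hi, and 'hi ≤ lo + 1' is Python's 'hi - lo == 1' base case)
def bBest (g : List (String × String) → Int) (tools : List (List (String × String))) :
    Nat → Nat → Nat → (List (String × String)) × Int
  | 0, lo, _ =>
    let tool := tools.getD lo []
    (tool, g tool)
  | fuel + 1, lo, hi =>
    if hi ≤ lo + 1 then
      let tool := tools.getD lo []
      (tool, g tool)
    else
      let mid := (lo + hi) / 2
      let left := bBest g tools fuel lo mid
      let right := bBest g tools fuel mid hi
      if left.2 ≥ right.2 then left else right

def select_best_tool_py_alt (question : String) (tools : List (List (String × String))) : List (String × String) :=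
  if tools = [] then []
  else if tools.length = 1 then PySem.List.pyGetD tools 0 []
  else
    let qwords : PySem.Set String :=
      PySem.Set.ofList (PySem.Str.split₀ (PySem.Str.lower question))
    (bBest (bScore qwords) tools tools.length 0 tools.length).1

-- ===== PRECONDITION & SPEC =====
def Spec_select_best_tool_py (question : String) (tools : List (List (String × String))) (out : List (String × String)) : Prop := out = select_best_tool_py_alt question tools
instance (question : String) (tools : List (List (String × String))) (out : List (String × String)) : Decidable (Spec_select_best_tool_py question tools out) := by unfold Spec_select_best_tool_py; infer_instance

-- ===== CLAIM (what is proved, stated in full; the proofs are below) =====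
def Claim_equal_select_best_tool_py : Prop := ∀ (question : String) (tools : List (List (String × String))), Dom_select_best_tool_py question tools → Spec_select_best_tool_py question tools (select_best_tool_py question tools)

-- ===== LEMMAS AND PROOFS =====

-- A's per-tool update step, with the score function abstracted out
def pvStep (g : List (String × String) → Int)
    (st : (List (String × String)) × Int) (t : List (String × String)) :
    (List (String × String)) × Int :=
  if g t > st.2 then (t, g t) else st

-- |s ∩ t| counted as a predicate count over s
lemma len_inter (s t : PySem.Set String) : PySem.Set.len (PySem.Set.inter s t)
    = ((List.countP (fun w => PySem.Set.contains t w) s : Nat) : Int) := by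
  simp [PySem.Set.inter, PySem.Set.len, List.countP_eq_length_filter]

-- membership in the union set is membership in the concatenated list
lemma contains_union_append (l1 l2 : List String) (w : String) :
    PySem.Set.contains (PySem.Set.union (PySem.Set.ofList l1) (PySem.Set.ofList l2)) w
      = (l1 ++ l2).contains w := by
  simp [PySem.Set.mem_union, PySem.Set.mem_ofList]

-- A's overlap score equals B's membership count
lemma score_eq (qset : PySem.Set String) (t : List (String × String)) :
    PySem.Set.len (PySem.Set.inter qset
      (PySem.Set.union
        (PySem.Set.ofList (PySem.Str.split₀ (PySem.Str.replace (PySem.Str.replace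
          (PySem.Str.lower ((PySem.Dict.ofList t).getD "name" "")) "_" " ") "-" " ")))
        (PySem.Set.ofList (PySem.Str.split₀ (PySem.Str.lower ((PySem.Dict.ofList t).getD "description" ""))))))
      = bScore qset t := by
  rw [len_inter]
  simp only [bScore]
  refine congrArg (fun n : Nat => (n : Int)) (List.countP_congr ?_)
  intro w _
  rw [contains_union_append]

-- unfolding the fold one step
lemma fm_cons (g : List (String × String) → Int) (y : List (String × String))
    (ys : List (List (String × String))) (b : List (String × String)) :
    (y :: ys).foldl (pvStep g) (b, g b)
      = if g y > g b then ys.foldl (pvStep g) (y, g y) else ys.foldl (pvStep g) (b, g b) := by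
  simp only [List.foldl_cons, pvStep]
  split_ifs <;> rfl

-- the second component is always the score of the first
lemma fm_inv (g : List (String × String) → Int) (ys : List (List (String × String))) :
    ∀ b : List (String × String),
    (ys.foldl (pvStep g) (b, g b)).2 = g ((ys.foldl (pvStep g) (b, g b)).1) := by
  induction ys with
  | nil => intro b; rfl
  | cons y ys ih =>
    intro b
    rw [fm_cons]
    split_ifs
    · exact ih y
    · exact ih b

-- first-max characterisation of the running-max fold
lemma fm_first_max (g : List (String × String) → Int) (ys : List (List (String × String))) :
    ∀ (y c : List (String × String)),
    (y :: ys).foldl (pvStep g) (c, g c)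
      = if (ys.foldl (pvStep g) (y, g y)).2 > g c then ys.foldl (pvStep g) (y, g y) else (c, g c) := by
  induction ys with
  | nil =>
    intro y c
    rw [fm_cons]
    rfl
  | cons y' ys ih =>
    intro y c
    rw [fm_cons, ih y' y, ih y' c]
    have h2 := fm_inv g ys y'
    split_ifs <;> first | rfl | omega

-- tournament = running-max fold over the segment tools[lo:hi]
lemma bBest_eq_fold (g : List (String × String) → Int) (tools : List (List (String × String))) :
    ∀ (n lo hi : Nat), hi - lo ≤ n → lo < hi → hi ≤ tools.length →
    bBest g tools n lo hi
      = (((tools.drop lo).take (hi - lo)).tail).foldl (pvStep g)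
          (tools.getD lo [], g (tools.getD lo [])) := by
  intro n
  induction n with
  | zero => intro lo hi h _ _; omega
  | succ n ih =>
    intro lo hi hn hlh hhi
    show (if hi ≤ lo + 1 then (tools.getD lo [], g (tools.getD lo []))
        else
          let mid := (lo + hi) / 2
          let left := bBest g tools n lo mid
          let right := bBest g tools n mid hi
          if left.2 ≥ right.2 then left else right) = _
    by_cases hbase : hi ≤ lo + 1
    · rw [if_pos hbase]
      have h1 : hi - lo = 1 := by omega
      have hlo : lo < tools.length := by omega
      have h2 : (List.take (hi - lo) (tools.drop lo)).tail = [] := by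
        rw [h1, List.drop_eq_getElem_cons hlo]
        rfl
      rw [h2]
      rfl
    · rw [if_neg hbase]
      have hmid1 : lo < (lo + hi) / 2 := by omega
      have hmid2 : (lo + hi) / 2 < hi := by omega
      show (if (bBest g tools n lo ((lo + hi) / 2)).2 ≥ (bBest g tools n ((lo + hi) / 2) hi).2
          then bBest g tools n lo ((lo + hi) / 2) else bBest g tools n ((lo + hi) / 2) hi) = _
      generalize (lo + hi) / 2 = mid at hmid1 hmid2 ⊢
      have e1 : mid - lo ≤ n := by omega
      have e2 : hi - mid ≤ n := by omega
      have e3 : mid ≤ tools.length := by omega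
      rw [ih lo mid e1 hmid1 e3, ih mid hi e2 hmid2 hhi]
      -- split the segment at mid
      have hseg : (tools.drop lo).take (hi - lo)
          = (tools.drop lo).take (mid - lo) ++ (tools.drop mid).take (hi - mid) := by
        have h2 : hi - lo = (mid - lo) + (hi - mid) := by omega
        have h4 : (tools.drop lo).drop (mid - lo) = tools.drop mid := by
          rw [List.drop_drop]
          congr 1
          omega
        rw [h2, List.take_add, h4]
      have hloL : lo < tools.length := by omega
      have hmidL : mid < tools.length := by omega
      have hconsL : (tools.drop lo).take (mid - lo)
          = tools[lo] :: (((tools.drop lo).take (mid - lo)).tail) := by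
        rw [List.drop_eq_getElem_cons hloL]
        have h3 : mid - lo = (mid - lo - 1) + 1 := by omega
        rw [h3, List.take_succ_cons]
        rfl
      have hconsR : (tools.drop mid).take (hi - mid)
          = tools[mid] :: (((tools.drop mid).take (hi - mid)).tail) := by
        rw [List.drop_eq_getElem_cons hmidL]
        have h3 : hi - mid = (hi - mid - 1) + 1 := by omega
        rw [h3, List.take_succ_cons]
        rfl
      have hgetlo : tools.getD lo [] = tools[lo] := List.getD_eq_getElem tools [] hloL
      have hgetmid : tools.getD mid [] = tools[mid] := List.getD_eq_getElem tools [] hmidL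
      rw [hseg]
      rw [List.tail_append_of_ne_nil (by rw [hconsL]; exact List.cons_ne_nil _ _)]
      rw [List.foldl_append]
      set L := (((tools.drop lo).take (mid - lo)).tail).foldl (pvStep g)
        (tools.getD lo [], g (tools.getD lo [])) with hL
      have hLinv : L = (L.1, g L.1) := by
        have h5 := fm_inv g (((tools.drop lo).take (mid - lo)).tail) (tools.getD lo [])
        rw [← hL] at h5
        exact Prod.ext rfl h5
      rw [hconsR, hLinv, hgetmid]
      rw [fm_first_max g _ tools[mid] L.1]
      simp only [List.tail_cons]
      set R := (((tools.drop mid).take (hi - mid)).tail).foldl (pvStep g)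
        (tools[mid], g tools[mid]) with hR
      have hL2 : L.2 = g L.1 := by rw [hLinv]
      rw [← hL2]
      split_ifs with hA hB
      · exact absurd hB (by omega)
      · exact Prod.ext rfl rfl
      · rfl
      · exact absurd (by omega : R.2 > L.2) ‹¬ R.2 > L.2›

-- ===== VERDICT (by name: the statement is the Claim_ definition above) =====
theorem select_best_tool_py_spec : Claim_equal_select_best_tool_py := by
  intro question tools _
  unfold Spec_select_best_tool_py select_best_tool_py select_best_tool_py_alt
  by_cases h0 : tools = []
  · simp [h0]
  · rw [if_neg h0, if_neg h0]
    by_cases h1 : tools.length = 1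
    · rw [if_pos h1, if_pos h1]
    · rw [if_neg h1, if_neg h1]
      obtain ⟨t0, rest, rfl⟩ := List.exists_cons_of_ne_nil h0
      set xs := t0 :: rest with hxs
      set qset : PySem.Set String :=
        PySem.Set.ofList (PySem.Str.split₀ (PySem.Str.lower question)) with hq
      set g := bScore qset with hg
      show (xs.foldl (fun (st : List (String × String) × Int) tool =>
          let d := PySem.Dict.ofList tool
          let name_words : PySem.Set String := PySem.Set.ofList (PySem.Str.split₀
            (PySem.Str.replace (PySem.Str.replace (PySem.Str.lower (d.getD "name" "")) "_" " ") "-" " "))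
          let desc_words : PySem.Set String := PySem.Set.ofList (PySem.Str.split₀
            (PySem.Str.lower (d.getD "description" "")))
          let tool_words := PySem.Set.union name_words desc_words
          let overlap : Int := PySem.Set.len (PySem.Set.inter qset tool_words)
          if overlap > st.2 then (tool, overlap) else st)
        (PySem.List.pyGetD xs 0 [], -1)).1
        = (bBest g xs xs.length 0 xs.length).1
      -- A's inline step function is pvStep applied to B's score function
      have hfun : (fun (st : List (String × String) × Int) tool =>
          let d := PySem.Dict.ofList tool
          let name_words : PySem.Set String := PySem.Set.ofList (PySem.Str.split₀
            (PySem.Str.replace (PySem.Str.replace (PySem.Str.lower (d.getD "name" "")) "_" " ") "-" " "))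
          let desc_words : PySem.Set String := PySem.Set.ofList (PySem.Str.split₀
            (PySem.Str.lower (d.getD "description" "")))
          let tool_words := PySem.Set.union name_words desc_words
          let overlap : Int := PySem.Set.len (PySem.Set.inter qset tool_words)
          if overlap > st.2 then (tool, overlap) else st) = pvStep g := by
        funext st t
        show (if PySem.Set.len (PySem.Set.inter qset _) > st.2
            then (t, PySem.Set.len (PySem.Set.inter qset _)) else st) = pvStep g st t
        rw [score_eq qset t]
        rfl
      rw [hfun]
      have hinit : PySem.List.pyGetD xs (0 : Int) [] = t0 := by
        rw [hxs]
        simp [PySem.List.pyGetD]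
      rw [hinit]
      have hstep1 : xs.foldl (pvStep g) (t0, -1) = rest.foldl (pvStep g) (t0, g t0) := by
        rw [hxs, List.foldl_cons]
        have hpos : g t0 > -1 := by
          have : (0 : Int) ≤ g t0 := by rw [hg]; simp only [bScore]; exact Int.natCast_nonneg _
          omega
        rw [show pvStep g (t0, -1) t0 = (t0, g t0) by simp [pvStep, hpos]]
      rw [hstep1]
      have hlen : 0 < xs.length := by simp [hxs]
      rw [bBest_eq_fold g xs xs.length 0 xs.length (by omega) hlen le_rfl]
      have hseg : ((xs.drop 0).take (xs.length - 0)).tail = rest := by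
        simp [hxs]
      have hget0 : xs.getD 0 [] = t0 := by rw [hxs]; rfl
      rw [hseg, hget0]
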